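-- pv_equiv track=rewrite | github.com/AnonymousSubm/ICAPS_2023_Submission | Task_Planner.py | equal_state
-- ===== SOURCE A (Python) =====
-- def equal_state(state1, state2):
--     flag = 0
--     for i in state1:
--         for j in state2:
--             if i == j:
--                 flag = flag + 1
--     if flag == len(state1):
--         return True
--     else:
--         return False
-- ===== SOURCE B (Python) =====
-- def equal_state(state1, state2):
--     c1 = {}
--     for i in state1:
--         c1[i] = c1.get(i, 0) + 1
--     c2 = {}
--     for j in state2:
--         c2[j] = c2.get(j, 0) + 1
--     pairs = 0
--     for k, v in c1.items():
--         pairs += v * c2.get(k, 0)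
--     return pairs == len(state1)
-- ===== Notes on version B (the rewrite author's own statement) =====
-- stated objective: faster
-- what changed: Counts both lists into frequency dicts once and computes the number of matching pairs as a sum of products count1(k)*count2(k) over the distinct keys of state1, instead of A's nested scan over all element pairs.
import Mathlib
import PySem

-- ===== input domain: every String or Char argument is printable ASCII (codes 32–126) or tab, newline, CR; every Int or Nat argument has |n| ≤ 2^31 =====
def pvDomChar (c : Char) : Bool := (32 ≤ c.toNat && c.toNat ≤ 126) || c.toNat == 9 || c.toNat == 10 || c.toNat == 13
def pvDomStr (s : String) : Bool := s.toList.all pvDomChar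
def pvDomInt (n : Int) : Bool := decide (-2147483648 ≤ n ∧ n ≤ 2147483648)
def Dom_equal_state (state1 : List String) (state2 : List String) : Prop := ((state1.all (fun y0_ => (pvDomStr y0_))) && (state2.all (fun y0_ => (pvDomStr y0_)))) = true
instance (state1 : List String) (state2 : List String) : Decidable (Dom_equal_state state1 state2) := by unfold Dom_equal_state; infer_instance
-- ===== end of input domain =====

-- B counts both lists into frequency dicts once and sums count1(k)*count2(k) over state1's distinct keys, replacing A's nested pair scan (asymptotically faster).

-- ===== PORT A =====
def equal_state (state1 : List String) (state2 : List String) : Bool :=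
  let flag : Int :=
    state1.foldl (fun flag i =>
      state2.foldl (fun flag j => if i == j then flag + 1 else flag) flag) 0
  if flag = (state1.length : Int) then true else false

-- ===== PORT B =====
def equal_state_alt (state1 : List String) (state2 : List String) : Bool :=
  let c1 : PySem.Dict String Int :=
    state1.foldl (fun d i => d.insert i (d.getD i 0 + 1)) PySem.Dict.empty
  let c2 : PySem.Dict String Int :=
    state2.foldl (fun d j => d.insert j (d.getD j 0 + 1)) PySem.Dict.empty
  let pairs : Int := c1.items.foldl (fun t kv => t + kv.2 * c2.getD kv.1 0) 0
  pairs == (state1.length : Int)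

-- ===== PRECONDITION & SPEC =====
def Spec_equal_state (state1 : List String) (state2 : List String) (out : Bool) : Prop := out = equal_state_alt state1 state2
instance (state1 : List String) (state2 : List String) (out : Bool) : Decidable (Spec_equal_state state1 state2 out) := by unfold Spec_equal_state; infer_instance

-- ===== CLAIM =====
def Claim_equal_equal_state : Prop := ∀ (state1 : List String) (state2 : List String), Dom_equal_state state1 state2 → Spec_equal_state state1 state2 (equal_state state1 state2)

-- ===== LEMMAS AND PROOFS =====

-- A's inner loop over state2 adds state2.count i to the accumulator.
theorem inner_loop_eq_count (i : String) (state2 : List String) (f : Int) :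
    state2.foldl (fun flag j => if i == j then flag + 1 else flag) f
      = f + (state2.count i : Int) := by
  induction state2 generalizing f with
  | nil => simp
  | cons x xs ih =>
    simp only [List.foldl_cons, List.count_cons, ih]
    by_cases h : i = x
    · simp [h]; ring
    · simp [h, Ne.symm h]

-- sum over a list = sum of count * value over its ordered dedup.
theorem sum_dedup_count_mul (l : List String) (g : String → Int) :
    ((PySem.List.dedup l).map (fun k => (l.count k : Int) * g k)).sum
      = (l.map g).sum := by
  have hnd : (PySem.List.dedup l).Nodup := PySem.List.nodup_dedup l
  have hfs : (PySem.List.dedup l).toFinset = l.toFinset := by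
    ext x; simp
  rw [List.sum_toFinset _ hnd |>.symm] at *
  · rw [hfs, Finset.sum_list_map_count]
    simp [mul_comm]

-- both programs compute the same total.
theorem flag_eq_pairs (state1 state2 : List String) :
    state1.foldl (fun flag i =>
        state2.foldl (fun flag j => if i == j then flag + 1 else flag) flag) 0
      = ((state1.foldl (fun d i => d.insert i (d.getD i 0 + 1)) (PySem.Dict.empty : PySem.Dict String Int)).items).foldl
          (fun t kv => t + kv.2 * (state2.foldl (fun d j => d.insert j (d.getD j 0 + 1)) (PySem.Dict.empty : PySem.Dict String Int)).getD kv.1 0) 0 := by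
  simp only [PySem.Dict.foldl_insert_getD_add_one_eq_counter,
      PySem.Dict.items_counter]
  have hA : state1.foldl (fun flag i =>
        state2.foldl (fun flag j => if i == j then flag + 1 else flag) flag) 0
      = (state1.map (fun i => (state2.count i : Int))).sum := by
    have := PySem.List.foldl_add (l := state1) (a := (0 : Int))
      (g := fun i => (state2.count i : Int))
    simp only [inner_loop_eq_count] at *
    simpa using this
  have hB : (((PySem.Set.ofList state1).map (fun k => (k, (state1.count k : Int)))).foldl
        (fun t kv => t + kv.2 * (PySem.Dict.counter state2).getD kv.1 0) 0)
      = ((PySem.List.dedup state1).map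
          (fun k => (state1.count k : Int) * (state2.count k : Int))).sum := by
    rw [List.foldl_map]
    have := PySem.List.foldl_add (l := (PySem.Set.ofList state1 : List String)) (a := (0 : Int))
      (g := fun k => (state1.count k : Int) * (PySem.Dict.counter state2).getD k 0)
    simp only [PySem.Dict.getD_counter] at this ⊢
    simpa [PySem.List.dedup_eq_ofList] using this
  rw [hA, hB, sum_dedup_count_mul]

-- ===== VERDICT =====
theorem equal_state_spec : Claim_equal_equal_state := by
  intro state1 state2 _
  simp only [Spec_equal_state, equal_state, equal_state_alt]
  rw [flag_eq_pairs]
  split <;> simp_all
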